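-- pv_equiv track=rewrite | github.com/sandipanghosh81/programming | vlsi/eda_tools/python/constraints_tool/constraints.py | _allocate_symmetric_slots
-- ===== SOURCE A (Python) =====
-- from typing import List, Dict, Set, Tuple
--
-- def _allocate_symmetric_slots(
--     available: Set[Tuple[int, int]],
--     count: int,
--     rows: int,
--     cols: int,
-- ) -> List[Tuple[int, int]]:
--     for r in range(rows):
--         row_slots = sorted([c for (rr, c) in available if rr == r])
--         if len(row_slots) < count:
--             continue
--         chosen: List[Tuple[int, int]] = []
--         left = 0
--         right = len(row_slots) - 1
--         while len(chosen) < count and left <= right: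
--             if len(chosen) + 1 == count and left == right:
--                 chosen.append((r, row_slots[left]))
--                 break
--             chosen.append((r, row_slots[left]))
--             if len(chosen) < count:
--                 chosen.append((r, row_slots[right]))
--             left += 1
--             right -= 1
--         if len(chosen) == count:
--             for slot in chosen:
--                 available.discard(slot)
--             return chosen
--     return []
-- ===== SOURCE B (Python) =====
-- from typing import List, Set, Tuple
--
-- def _allocate_symmetric_slots(
--     available: Set[Tuple[int, int]],
--     count: int,
--     rows: int,
--     cols: int,
-- ) -> List[Tuple[int, int]]:
--     if count <= 0:
--         return []
--     for r in range(rows):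
--         row_slots = sorted(c for (rr, c) in available if rr == r)
--         if len(row_slots) < count:
--             continue
--         num_right = count // 2
--         num_left = count - num_right
--         left_part = row_slots[:num_left]
--         right_part = row_slots[len(row_slots) - num_right:][::-1]
--         chosen = [(r, c) for pair in zip(left_part, right_part) for c in pair]
--         if num_left > num_right:
--             chosen.append((r, left_part[-1]))
--         for slot in chosen:
--             available.discard(slot)
--         return chosen
--     return []
-- ===== Notes on version B (the rewrite author's own statement) =====
-- stated objective: alternative
-- what changed: The stateful two-pointer while-loop with its special odd-middle break is replaced by a closed-form slice-and-interleave: take the ceil(count/2) smallest and floor(count/2) largest column slots as two slices and zip them together, with a count<=0 early return.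
import Mathlib
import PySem

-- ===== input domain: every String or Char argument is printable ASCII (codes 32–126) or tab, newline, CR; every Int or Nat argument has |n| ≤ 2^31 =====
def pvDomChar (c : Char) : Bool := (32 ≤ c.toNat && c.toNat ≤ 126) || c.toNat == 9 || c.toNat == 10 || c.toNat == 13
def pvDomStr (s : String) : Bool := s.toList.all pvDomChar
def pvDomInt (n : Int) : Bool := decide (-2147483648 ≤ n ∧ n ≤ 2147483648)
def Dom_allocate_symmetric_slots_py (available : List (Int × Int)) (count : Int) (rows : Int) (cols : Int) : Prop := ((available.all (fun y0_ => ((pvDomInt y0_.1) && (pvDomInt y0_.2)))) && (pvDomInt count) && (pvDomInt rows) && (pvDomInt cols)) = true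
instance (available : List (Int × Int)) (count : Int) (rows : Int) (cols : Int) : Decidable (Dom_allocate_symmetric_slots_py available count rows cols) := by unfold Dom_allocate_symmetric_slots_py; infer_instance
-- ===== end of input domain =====

-- B replaces A's two-pointer while-loop by a closed-form slice-and-interleave of the two symmetric
-- halves (objective: alternative). A mutates the `available` set (discards the chosen slots) and B
-- performs the same mutation in Python; the equivalence proved here is about the RETURN value only.

-- ===== PORT A =====
-- the while-loop: state (chosen, left, right); row_slots[i] via pyGetD (indices are always in
-- range when the loop body runs, so the default is never the result)
def pvALoop (L : List Int) (r count : Int) (chosen : List (Int × Int)) (left right : Int) :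
    List (Int × Int) :=
  if h : (chosen.length : Int) < count ∧ left ≤ right then
    if (chosen.length : Int) + 1 = count ∧ left = right then
      chosen ++ [(r, PySem.List.pyGetD L left 0)]
    else
      let c1 := chosen ++ [(r, PySem.List.pyGetD L left 0)]
      let c2 := if (c1.length : Int) < count then c1 ++ [(r, PySem.List.pyGetD L right 0)] else c1
      pvALoop L r count c2 (left + 1) (right - 1)
  else chosen
termination_by (right + 1 - left).toNat
decreasing_by omega

-- the `for r in range(rows)` loop (the discards from `available` happen just before the return
-- and cannot affect the returned value, so they are not modelled)
def pvARows (available : List (Int × Int)) (count : Int) : List Int → List (Int × Int)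
  | [] => []
  | r :: rest =>
    let row_slots := PySem.List.sorted ((available.filter (fun p => p.1 == r)).map (·.2)) id false
    if (row_slots.length : Int) < count then pvARows available count rest
    else
      let chosen := pvALoop row_slots r count [] 0 ((row_slots.length : Int) - 1)
      if (chosen.length : Int) = count then chosen else pvARows available count rest

def allocate_symmetric_slots_py (available : List (Int × Int)) (count : Int) (rows : Int)
    (cols : Int) : List (Int × Int) :=
  pvARows available count (PySem.List.pyRange 0 rows 1)

-- ===== PORT B =====
-- row_slots[::-1] is List.reverse (PySem.List.slice?_none_none_neg_one); the nested list
-- comprehension over zip is flatMap of the two-element lists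
def pvBRows (available : List (Int × Int)) (count : Int) : List Int → List (Int × Int)
  | [] => []
  | r :: rest =>
    let row_slots := PySem.List.sorted ((available.filter (fun p => p.1 == r)).map (·.2)) id false
    if (row_slots.length : Int) < count then pvBRows available count rest
    else
      let num_right := PySem.Int.floordiv count 2
      let num_left := count - num_right
      let left_part := PySem.List.slice row_slots none (some num_left)
      let right_part :=
        (PySem.List.slice row_slots (some ((row_slots.length : Int) - num_right)) none).reverse
      let pairs := (left_part.zip right_part).flatMap (fun p => [(r, p.1), (r, p.2)])
      if num_right < num_left then pairs ++ [(r, PySem.List.pyGetD left_part (-1) 0)] else pairs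

def allocate_symmetric_slots_py_alt (available : List (Int × Int)) (count : Int) (rows : Int)
    (cols : Int) : List (Int × Int) :=
  if count ≤ 0 then []
  else pvBRows available count (PySem.List.pyRange 0 rows 1)

-- ===== PRECONDITION & SPEC =====
def Spec_allocate_symmetric_slots_py (available : List (Int × Int)) (count : Int) (rows : Int) (cols : Int) (out : List (Int × Int)) : Prop := out = allocate_symmetric_slots_py_alt available count rows cols
instance (available : List (Int × Int)) (count : Int) (rows : Int) (cols : Int) (out : List (Int × Int)) : Decidable (Spec_allocate_symmetric_slots_py available count rows cols out) := by unfold Spec_allocate_symmetric_slots_py; infer_instance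

-- ===== CLAIM (what is proved, stated in full; the proofs are below) =====
def Claim_equal_allocate_symmetric_slots_py : Prop := ∀ (available : List (Int × Int)) (count : Int) (rows : Int) (cols : Int), Dom_allocate_symmetric_slots_py available count rows cols → Spec_allocate_symmetric_slots_py available count rows cols (allocate_symmetric_slots_py available count rows cols)

-- ===== LEMMAS AND PROOFS =====

-- reference picker: alternately the smallest and the largest remaining element, m picks in total
def pvPick : Nat → List Int → List Int
  | 0, _ => []
  | 1, xs => xs.take 1
  | m + 2, xs =>
    match xs with
    | [] => []
    | x :: rest => x :: (rest.getLast?.toList ++ pvPick m rest.dropLast)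

lemma pvPick_length : ∀ (m : Nat) (xs : List Int), m ≤ xs.length → (pvPick m xs).length = m := by
  intro m
  induction m using Nat.strong_induction_on with
  | _ m ih =>
    intro xs hm
    match m with
    | 0 => simp [pvPick]
    | 1 =>
      simp only [pvPick, List.length_take]
      omega
    | k + 2 =>
      match xs with
      | [] => simp at hm
      | x :: rest =>
        have hrest : rest ≠ [] := by
          intro h; subst h; simp at hm
        obtain ⟨mid, y, hmy⟩ : ∃ mid y, rest = mid ++ [y] :=
          ⟨rest.dropLast, rest.getLast hrest, (List.dropLast_concat_getLast hrest).symm⟩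
        have hmid : k ≤ mid.length := by rw [hmy] at hm; simp at hm; omega
        have hk := ih k (by omega) mid hmid
        simp only [pvPick, hmy, List.getLast?_concat, List.dropLast_concat, Option.toList_some]
        simp [hk]

-- the segment L[a..b] (inclusive), as A's index pair traverses it
def pvSeg (L : List Int) (a b : Nat) : List Int := (L.drop a).take (b + 1 - a)

lemma pvSeg_cons (L : List Int) (a b : Nat) (ha : a < L.length) (hab : a ≤ b) :
    pvSeg L a b = L[a] :: pvSeg L (a + 1) b := by
  unfold pvSeg
  have h4 : b + 1 - (a + 1) = b - a := by omega
  have h5 : b + 1 - a = (b - a) + 1 := by omega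
  rw [h4, h5, List.drop_eq_getElem_cons ha, List.take_succ_cons]

lemma pvSeg_snoc (L : List Int) (a b : Nat) (hb : b < L.length) (hab : a ≤ b) (hb1 : 1 ≤ b) :
    pvSeg L a b = pvSeg L a (b - 1) ++ [L[b]] := by
  unfold pvSeg
  have h1 : b + 1 - a = (b - a) + 1 := by omega
  have h2 : b - 1 + 1 - a = b - a := by omega
  have hlt : b - a < (L.drop a).length := by rw [List.length_drop]; omega
  have h6 : a + (b - a) = b := by omega
  rw [h1, h2, List.take_add_one, List.getElem?_eq_getElem hlt]
  simp only [List.getElem_drop, Option.toList_some, h6]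

lemma pvSeg_cons_decomp (L : List Int) (a b : Nat) (ha : a < L.length) (hb : b < L.length)
    (hab : a < b) :
    pvSeg L a b = L[a] :: (pvSeg L (a + 1) (b - 1) ++ [L[b]]) := by
  rw [pvSeg_cons L a b ha (by omega), pvSeg_snoc L (a + 1) b hb (by omega) (by omega)]

-- A's while-loop computes `chosen ++ pvPick m (segment [left..right])` when it still needs m
-- picks and the segment is long enough
lemma pvALoop_eq : ∀ (m : Nat) (L : List Int) (r count : Int) (chosen : List (Int × Int))
    (lt rt : Int), count = chosen.length + m → 0 ≤ lt → rt < L.length →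
    (m : Int) ≤ rt + 1 - lt →
    pvALoop L r count chosen lt rt
      = chosen ++ (pvPick m (pvSeg L lt.toNat rt.toNat)).map (fun c => (r, c)) := by
  intro m
  induction m using Nat.strong_induction_on with
  | _ m ih =>
    intro L r count chosen lt rt hcount hlt hrt hm
    match m with
    | 0 =>
      rw [pvALoop]
      rw [dif_neg (by omega)]
      simp [pvPick]
    | 1 =>
      have hltrt : lt ≤ rt := by omega
      have hlen : lt < (L.length : Int) := by omega
      have hget : PySem.List.pyGetD L lt 0 = L[lt.toNat] := by
        exact PySem.List.pyGetD_eq_getElem L 0 hlt hlen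
      have hseg : pvPick 1 (pvSeg L lt.toNat rt.toNat) = [L[lt.toNat]] := by
        have hcons := pvSeg_cons L lt.toNat rt.toNat (by omega) (by omega)
        simp only [pvPick, hcons, List.take_succ_cons, List.take_zero]
      rw [pvALoop]
      rw [dif_pos ⟨by omega, hltrt⟩]
      by_cases heq : lt = rt
      · rw [if_pos ⟨by omega, heq⟩, hget, hseg]
        simp
      · rw [if_neg (by intro h; exact heq h.2)]
        simp only []
        rw [if_neg (by simp; omega)]
        rw [pvALoop]
        rw [dif_neg (by simp; omega)]
        rw [hget, hseg]
        simp
    | k + 2 =>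
      have hltrt : lt < rt := by omega
      have hlen : lt < (L.length : Int) := by omega
      have hgetl : PySem.List.pyGetD L lt 0 = L[lt.toNat] := by
        exact PySem.List.pyGetD_eq_getElem L 0 hlt hlen
      have hgetr : PySem.List.pyGetD L rt 0 = L[rt.toNat] := by
        exact PySem.List.pyGetD_eq_getElem L 0 (by omega) hrt
      rw [pvALoop]
      rw [dif_pos ⟨by omega, by omega⟩]
      rw [if_neg (by intro h; omega)]
      simp only []
      rw [if_pos (by simp; omega)]
      rw [ih k (by omega) L r count
            (chosen ++ [(r, PySem.List.pyGetD L lt 0)] ++ [(r, PySem.List.pyGetD L rt 0)])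
            (lt + 1) (rt - 1) (by simp; omega) (by omega) (by omega) (by omega)]
      have hdecomp := pvSeg_cons_decomp L lt.toNat rt.toNat (by omega) (by omega) (by omega)
      have hrest_ne : pvSeg L (lt.toNat + 1) (rt.toNat - 1) ++ [L[rt.toNat]] ≠ [] := by simp
      have hidx1 : (lt + 1).toNat = lt.toNat + 1 := by omega
      have hidx2 : (rt - 1).toNat = rt.toNat - 1 := by omega
      rw [hidx1, hidx2]
      have hpick : pvPick (k + 2) (pvSeg L lt.toNat rt.toNat)
          = L[lt.toNat] :: L[rt.toNat] :: pvPick k (pvSeg L (lt.toNat + 1) (rt.toNat - 1)) := by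
        rw [hdecomp]
        simp only [pvPick, List.getLast?_concat, List.dropLast_concat, Option.toList_some]
        simp
      rw [hpick, hgetl, hgetr]
      simp

-- B's slice-and-interleave equals pvPick, in Nat form
lemma pvB_interleave : ∀ (m : Nat) (xs : List Int) (r : Int), m ≤ xs.length →
    (((xs.take (m - m / 2)).zip ((xs.drop (xs.length - m / 2)).reverse)).flatMap
        (fun p => [(r, p.1), (r, p.2)]))
      ++ (if m / 2 < m - m / 2 then [(r, PySem.List.pyGetD (xs.take (m - m / 2)) (-1) 0)] else [])
    = (pvPick m xs).map (fun c => (r, c)) := by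
  intro m
  induction m using Nat.strong_induction_on with
  | _ m ih =>
    intro xs r hm
    match m with
    | 0 => simp [pvPick]
    | 1 =>
      match xs with
      | [] => simp at hm
      | x :: rest =>
        simp only [Nat.reduceDiv, Nat.sub_zero, List.take_succ_cons, List.take_zero]
        rw [List.drop_length]
        simp only [List.reverse_nil, List.zip_nil_right, List.flatMap_nil, List.nil_append,
          if_pos (by omega : (0:Nat) < 1)]
        rw [PySem.List.pyGetD_neg_one [x] 0 (by simp)]
        simp [pvPick]
    | k + 2 =>
      match xs with
      | [] => simp at hm
      | x :: rest =>
        have hrest : rest ≠ [] := by intro h; subst h; simp at hm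
        obtain ⟨mid, y, hmy⟩ : ∃ mid y, rest = mid ++ [y] :=
          ⟨rest.dropLast, rest.getLast hrest, (List.dropLast_concat_getLast hrest).symm⟩
        have hmid : k ≤ mid.length := by
          have := hm; rw [hmy] at this; simp at this; omega
        -- arithmetic on the split
        have hnl : (k + 2) - (k + 2) / 2 = (k - k / 2) + 1 := by omega
        have hnr : (k + 2) / 2 = k / 2 + 1 := by omega
        set nl := k - k / 2 with hnl_def
        set nr := k / 2 with hnr_def
        have hnl_le : nl ≤ mid.length := by omega
        have hnr_le : nr ≤ mid.length := by omega
        -- left part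
        have hleft : (x :: rest).take ((k + 2) - (k + 2) / 2) = x :: mid.take nl := by
          rw [hnl, List.take_succ_cons, hmy, List.take_append_of_le_length hnl_le]
        -- right part
        have hlen_xs : (x :: rest).length = mid.length + 2 := by rw [hmy]; simp
        have hdropidx : (x :: rest).length - (k + 2) / 2 = (mid.length - nr) + 1 := by
          rw [hlen_xs, hnr]; omega
        have hright : (x :: rest).drop ((x :: rest).length - (k + 2) / 2)
            = mid.drop (mid.length - nr) ++ [y] := by
          rw [hdropidx, List.drop_succ_cons, hmy,
            List.drop_append_of_le_length (by omega)]
        rw [hleft, hright]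
        simp only [List.reverse_append, List.reverse_singleton, List.singleton_append,
          List.zip_cons_cons, List.flatMap_cons]
        -- the odd leftover element
        have hlast : (nr < nl) → PySem.List.pyGetD (x :: mid.take nl) (-1) 0
            = PySem.List.pyGetD (mid.take nl) (-1) 0 := by
          intro hodd
          have htne : mid.take nl ≠ [] := by
            apply List.ne_nil_of_length_pos
            rw [List.length_take]
            omega
          rw [PySem.List.pyGetD_neg_one (x :: mid.take nl) 0 (by simp),
            PySem.List.pyGetD_neg_one (mid.take nl) 0 htne]
          exact List.getLast_cons htne
        have hih := ih k (by omega) mid r hmid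
        -- pvPick unfolds
        have hpick : pvPick (k + 2) (x :: rest) = x :: y :: pvPick k mid := by
          simp only [pvPick, hmy, List.getLast?_concat, List.dropLast_concat,
            Option.toList_some]
          rfl
        rw [hpick]
        simp only [List.map_cons]
        rw [hnl, hnr]
        simp only [Nat.add_lt_add_iff_right]
        by_cases hodd : nr < nl
        · rw [if_pos hodd, hlast hodd, ← hih, if_pos hodd]
          simp [hnl_def, hnr_def]
        · rw [if_neg hodd, ← hih, if_neg hodd]
          simp [hnl_def, hnr_def]

-- per-row equality for count ≥ 1 and enough slots
lemma pvRow_eq (L : List Int) (r count : Int) (hc : 1 ≤ count) (hlen : count ≤ (L.length : Int)) :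
    pvALoop L r count [] 0 ((L.length : Int) - 1)
      = (if PySem.Int.floordiv count 2 < count - PySem.Int.floordiv count 2 then
          (((PySem.List.slice L none (some (count - PySem.Int.floordiv count 2))).zip
              ((PySem.List.slice L (some ((L.length : Int) - PySem.Int.floordiv count 2)) none).reverse)).flatMap
            (fun p => [(r, p.1), (r, p.2)]))
            ++ [(r, PySem.List.pyGetD (PySem.List.slice L none (some (count - PySem.Int.floordiv count 2))) (-1) 0)]
        else
          (((PySem.List.slice L none (some (count - PySem.Int.floordiv count 2))).zip
              ((PySem.List.slice L (some ((L.length : Int) - PySem.Int.floordiv count 2)) none).reverse)).flatMap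
            (fun p => [(r, p.1), (r, p.2)]))) := by
  set m : Nat := count.toNat with hm_def
  have hmc : (m : Int) = count := by omega
  have hm_len : m ≤ L.length := by omega
  -- A side
  have hA := pvALoop_eq m L r count [] 0 ((L.length : Int) - 1) (by simp; omega) (by omega)
    (by omega) (by omega)
  have hseg : pvSeg L (0 : Int).toNat ((L.length : Int) - 1).toNat = L := by
    unfold pvSeg
    have h0 : (0 : Int).toNat = 0 := rfl
    have h1 : ((L.length : Int) - 1).toNat = L.length - 1 := by omega
    rw [h0, h1]
    simp only [List.drop_zero]
    have : L.length - 1 + 1 - 0 = L.length ∨ L.length = 0 := by omega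
    rcases this with h | h
    · rw [h, List.take_length]
    · omega
  rw [hseg] at hA
  rw [hA]
  -- B side: rewrite the Int-level slices/floordiv into Nat form
  have hfd : PySem.Int.floordiv count 2 = ((m / 2 : Nat) : Int) := by
    rw [← hmc]
    exact_mod_cast PySem.Int.floordiv_natCast m 2
  have hnl : count - PySem.Int.floordiv count 2 = ((m - m / 2 : Nat) : Int) := by
    rw [hfd, ← hmc]; omega
  have hslice_l : PySem.List.slice L none (some (count - PySem.Int.floordiv count 2))
      = L.take (m - m / 2) := by
    rw [hnl, PySem.List.slice_to_natCast]
  have hdr : (L.length : Int) - PySem.Int.floordiv count 2 = ((L.length - m / 2 : Nat) : Int) := by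
    rw [hfd]
    have : m / 2 ≤ L.length := by omega
    omega
  have hslice_r : PySem.List.slice L (some ((L.length : Int) - PySem.Int.floordiv count 2)) none
      = L.drop (L.length - m / 2) := by
    rw [hdr, PySem.List.slice_from_natCast]
  rw [hslice_l, hslice_r, hnl, hfd]
  have hB := pvB_interleave m L r hm_len
  by_cases h : m / 2 < m - m / 2
  · rw [if_pos (by exact_mod_cast h : ((m / 2 : Nat) : Int) < ((m - m / 2 : Nat) : Int))]
    rw [if_pos h] at hB
    rw [List.nil_append, ← hB]
  · rw [if_neg (by exact_mod_cast h : ¬ ((m / 2 : Nat) : Int) < ((m - m / 2 : Nat) : Int))]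
    rw [if_neg h] at hB
    rw [List.nil_append, ← hB]
    simp

-- both row loops agree for count ≥ 1
lemma pvRows_eq (available : List (Int × Int)) (count : Int) (hc : 1 ≤ count) :
    ∀ rs : List Int, pvARows available count rs = pvBRows available count rs := by
  intro rs
  induction rs with
  | nil => rfl
  | cons r rest ih =>
    simp only [pvARows, pvBRows]
    set L := PySem.List.sorted ((available.filter (fun p => p.1 == r)).map (·.2)) id false with hL
    by_cases hlen : (L.length : Int) < count
    · rw [if_pos hlen, if_pos hlen, ih]
    · rw [if_neg hlen, if_neg hlen]
      have hlen' : count ≤ (L.length : Int) := by omega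
      have hrow := pvRow_eq L r count hc hlen'
      have hchosen_len : ((pvALoop L r count [] 0 ((L.length : Int) - 1)).length : Int) = count := by
        have hA := pvALoop_eq count.toNat L r count [] 0 ((L.length : Int) - 1)
          (by simp; omega) (by omega) (by omega) (by omega)
        rw [hA]
        simp only [List.nil_append, List.length_map]
        rw [pvPick_length count.toNat _ (by unfold pvSeg; simp; omega)]
        omega
      rw [if_pos hchosen_len]
      exact hrow

-- for count ≤ 0 A returns [] from every row it examines
lemma pvARows_nonpos (available : List (Int × Int)) (count : Int) (hc : count ≤ 0) :
    ∀ rs : List Int, pvARows available count rs = [] := by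
  intro rs
  induction rs with
  | nil => rfl
  | cons r rest ih =>
    simp only [pvARows]
    set L := PySem.List.sorted ((available.filter (fun p => p.1 == r)).map (·.2)) id false with hL
    by_cases hlen : (L.length : Int) < count
    · rw [if_pos hlen, ih]
    · rw [if_neg hlen]
      have hloop : pvALoop L r count [] 0 ((L.length : Int) - 1) = [] := by
        rw [pvALoop, dif_neg (by simp; omega)]
      rw [hloop]
      by_cases h0 : ((List.length ([] : List (Int × Int))) : Int) = count
      · rw [if_pos h0]
      · rw [if_neg h0, ih]

-- ===== VERDICT (by name: the statement is the Claim_ definition above) =====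
theorem allocate_symmetric_slots_py_spec : Claim_equal_allocate_symmetric_slots_py := by
  intro available count rows cols _
  unfold Spec_allocate_symmetric_slots_py allocate_symmetric_slots_py allocate_symmetric_slots_py_alt
  by_cases hc : count ≤ 0
  · rw [if_pos hc, pvARows_nonpos available count hc]
  · rw [if_neg hc, pvRows_eq available count (by omega)]
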